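-- pv_equiv track=rewrite | github.com/ljdursi/rosalind_chapel | problems/GREP/grep.py | dfs_paths
-- ===== SOURCE A (Python) =====
-- def dfs_paths(graph, start, sequences):
--     stack = [[start]]
--     while stack:
--         path = stack.pop()
--         vertex = path[-1]
--         neighbors = graph[vertex] - set(path)
--         for next_node in neighbors:
--             stack.append(path + [next_node])
--
--         if len(path) == len(sequences):
--             result = "".join([sequences[idx][0] for idx in path])
--             yield result
-- ===== SOURCE B (Python) =====
-- def dfs_paths(graph, start, sequences):
--     # Recursive pruned backtracking instead of an explicit stack of path copies:
--     # stop extending once the path reaches len(sequences), since longer paths can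
--     # never be emitted; recurse on the reversed neighbor order to match the LIFO order.
--     target = len(sequences)
--     def rec(path):
--         if len(path) >= target:
--             if len(path) == target:
--                 yield "".join(sequences[idx][0] for idx in path)
--             return
--         neighbors = graph[path[-1]] - set(path)
--         for next_node in reversed(list(neighbors)):
--             yield from rec(path + [next_node])
--     yield from rec([start])
-- ===== Notes on version B (the rewrite author's own statement) =====
-- stated objective: faster
-- what changed: A's explicit stack of copied paths is replaced by a recursive backtracking generator that prunes the search at depth len(sequences), so subtrees below full-length paths (which can never emit) are never explored.
import Mathlib
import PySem

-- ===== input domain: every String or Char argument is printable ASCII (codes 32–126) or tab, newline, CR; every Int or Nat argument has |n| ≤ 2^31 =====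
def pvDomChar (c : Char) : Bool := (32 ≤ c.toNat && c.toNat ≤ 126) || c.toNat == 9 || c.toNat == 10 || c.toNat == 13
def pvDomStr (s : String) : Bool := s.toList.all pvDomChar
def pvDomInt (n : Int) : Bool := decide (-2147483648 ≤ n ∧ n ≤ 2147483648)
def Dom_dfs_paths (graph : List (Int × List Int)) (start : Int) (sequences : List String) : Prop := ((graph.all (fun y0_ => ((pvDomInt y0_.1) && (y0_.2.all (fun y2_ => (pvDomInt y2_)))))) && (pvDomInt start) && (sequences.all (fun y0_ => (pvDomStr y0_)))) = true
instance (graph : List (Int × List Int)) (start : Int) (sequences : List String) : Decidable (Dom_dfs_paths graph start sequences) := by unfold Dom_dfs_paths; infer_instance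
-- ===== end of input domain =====

-- B replaces A's explicit stack of path copies by a recursive backtracking generator that
-- PRUNES: it never extends a path that already has len(sequences) vertices (longer paths can
-- emit nothing), recursing over the reversed neighbor order so the emission order matches the
-- LIFO stack's.  Equivalence is about the RETURN value (neither program mutates its inputs).

-- ===== shared helper (both Pythons contain the identical join expression) =====

-- "".join(sequences[idx][0] for idx in path): none exactly where Python raises IndexError
def pvFirstChars (seqs : List String) : List Int → Option (List Char)
  | [] => some []
  | i :: is =>
    match (PySem.List.pyGet? seqs i).bind (fun s => PySem.Str.pyGet? s 0) with
    | none => none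
    | some c => (pvFirstChars seqs is).map (fun cs => c :: cs)

-- ===== termination machinery for PORT A's while loop (cited by its decreasing_by) =====

theorem pv_length_filter_lt {α : Type} (l : List α) (p q : α → Bool)
    (himp : ∀ x, q x = true → p x = true) (a : α) (ha : a ∈ l)
    (hpa : p a = true) (hqa : q a = false) :
    (l.filter q).length < (l.filter p).length := by
  have hsub : ∀ (m : List α), List.Sublist (m.filter q) (m.filter p) := by
    intro m
    induction m with
    | nil => simp
    | cons y ys ihm =>
      by_cases hy : q y = true
      · rw [List.filter_cons_of_pos hy, List.filter_cons_of_pos (himp y hy)]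
        exact ihm.cons₂ y
      · rw [List.filter_cons_of_neg (by simpa using hy)]
        by_cases hpy : p y = true
        · rw [List.filter_cons_of_pos hpy]; exact ihm.cons y
        · rw [List.filter_cons_of_neg (by simpa using hpy)]; exact ihm
  induction l with
  | nil => cases ha
  | cons x xs ih =>
    rcases List.mem_cons.1 ha with rfl | hmem
    · rw [List.filter_cons_of_neg (by simp [hqa]), List.filter_cons_of_pos hpa]
      exact Nat.lt_succ_of_le (hsub xs).length_le
    · by_cases hx : q x = true
      · rw [List.filter_cons_of_pos hx, List.filter_cons_of_pos (himp x hx)]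
        exact Nat.succ_lt_succ (ih hmem)
      · rw [List.filter_cons_of_neg (by simpa using hx)]
        by_cases hpx : p x = true
        · rw [List.filter_cons_of_pos hpx]; exact Nat.lt_succ_of_lt (ih hmem)
        · rw [List.filter_cons_of_neg (by simpa using hpx)]; exact ih hmem

def pvUniv (graph : List (Int × List Int)) (start : Int) : List Int :=
  PySem.List.dedup (start :: graph.flatMap (fun kv => kv.2))
def pvMu (graph : List (Int × List Int)) (start : Int) (seen : List Int) : Nat :=
  ((pvUniv graph start).filter (fun v => !seen.contains v)).length

theorem pvMu_lt (graph : List (Int × List Int)) (start : Int) (path : List Int) (n : Int)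
    (hn : n ∈ pvUniv graph start) (hnp : path.contains n = false) :
    pvMu graph start (path ++ [n]) < pvMu graph start path := by
  apply pv_length_filter_lt (pvUniv graph start)
    (fun v => !path.contains v) (fun v => !(path ++ [n]).contains v) ?_ n hn (by simpa using hnp) (by simp)
  intro x hx
  simp only [Bool.not_eq_true', List.contains_append, Bool.or_eq_false_iff] at hx
  simpa using hx.1

theorem pv_get?_mem (graph : List (Int × List Int)) (k : Int) (v : List Int)
    (h : (PySem.Dict.mk graph).get? k = some v) : (k, v) ∈ graph := by
  induction graph with
  | nil => simp [PySem.Dict.get?] at h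
  | cons kv rest ih =>
    obtain ⟨a, b⟩ := kv
    rw [PySem.Dict.get?_mk_cons] at h
    by_cases he : a = k
    · subst he
      simp only [BEq.rfl, if_pos] at h
      cases h
      exact List.mem_cons_self
    · have hne : (a == k) = false := by simpa using he
      rw [hne] at h
      simp only [Bool.false_eq_true, if_neg, not_false_iff] at h
      exact List.mem_cons_of_mem _ (ih h)

theorem pv_nodup_subset_length {α : Type} [DecidableEq α] (l1 l2 : List α)
    (h1 : l1.Nodup) (h2 : l1 ⊆ l2) : l1.length ≤ l2.length := by
  calc l1.length = l1.toFinset.card := (List.toFinset_card_of_nodup h1).symm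
    _ ≤ l2.toFinset.card := Finset.card_le_card (by
        intro x hx; rw [List.mem_toFinset] at hx ⊢; exact h2 hx)
    _ ≤ l2.length := l2.toFinset_card_le

theorem pv_adj_sub (graph : List (Int × List Int)) (start : Int) (k : Int) (adj : List Int)
    (h : (PySem.Dict.mk graph).get? k = some adj) :
    ∀ n ∈ adj, n ∈ pvUniv graph start := by
  intro n hn
  have hkv := pv_get?_mem graph k adj h
  simp only [pvUniv, PySem.List.mem_dedup, List.mem_cons, List.mem_flatMap]
  exact Or.inr ⟨(k, adj), hkv, hn⟩

def pvW (graph : List (Int × List Int)) (start : Int) (path : List Int) : Nat :=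
  ((pvUniv graph start).length + 1) ^ pvMu graph start path
def pvSM (graph : List (Int × List Int)) (start : Int) (stack : List (List Int)) : Nat :=
  (stack.map (pvW graph start)).sum

theorem pvSM_dec (graph : List (Int × List Int)) (start : Int) (path : List Int)
    (rest : List (List Int)) (adj : List Int)
    (hadj : ∀ n ∈ adj, n ∈ pvUniv graph start) :
    pvSM graph start
      ((((PySem.Set.ofList adj).filter (fun n => !path.contains n)).map
          (fun n => path ++ [n])).reverse ++ rest)
      < pvSM graph start (path :: rest) := by
  set K := (pvUniv graph start).length with hK
  set μ := pvMu graph start path with hμ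
  set neighbors := (PySem.Set.ofList adj).filter (fun n => !path.contains n) with hnb
  have hmemnb : ∀ n ∈ neighbors, n ∈ pvUniv graph start ∧ path.contains n = false := by
    intro n hn
    rw [hnb, List.mem_filter] at hn
    exact ⟨hadj n ((PySem.Set.mem_ofList _ _).1 hn.1), by simpa using hn.2⟩
  simp only [pvSM, List.map_append, List.sum_append, List.map_reverse, List.sum_reverse,
    List.map_cons, List.sum_cons, List.map_map]
  have key : (neighbors.map ((pvW graph start) ∘ (fun n => path ++ [n]))).sum < pvW graph start path := by
    rcases eq_or_ne neighbors [] with hnil | hne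
    · rw [hnil]
      simp only [List.map_nil, List.sum_nil, pvW]
      exact Nat.pow_pos (by omega)
    · obtain ⟨n0', hn0'⟩ := List.exists_mem_of_ne_nil neighbors hne
      have hμpos : 1 ≤ μ := by
        have := pvMu_lt graph start path n0' (hmemnb n0' hn0').1 (hmemnb n0' hn0').2
        omega
      have hbound : ∀ x ∈ neighbors.map ((pvW graph start) ∘ (fun n => path ++ [n])),
          x ≤ (K + 1) ^ (μ - 1) := by
        intro x hx
        rw [List.mem_map] at hx
        obtain ⟨n, hn, rfl⟩ := hx
        have hlt := pvMu_lt graph start path n (hmemnb n hn).1 (hmemnb n hn).2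
        have : pvMu graph start (path ++ [n]) ≤ μ - 1 := by omega
        exact Nat.pow_le_pow_right (by omega) this
      have hsum := List.sum_le_card_nsmul _ _ hbound
      rw [List.length_map] at hsum
      have hlen : neighbors.length ≤ μ := by
        have hsub2 : neighbors ⊆ (pvUniv graph start).filter (fun v => !path.contains v) := by
          intro x hx
          rw [List.mem_filter]
          exact ⟨(hmemnb x hx).1, by simpa using (hmemnb x hx).2⟩
        have := pv_nodup_subset_length neighbors
          ((pvUniv graph start).filter (fun v => !path.contains v))
          (List.Nodup.filter _ (PySem.Set.nodup_ofList adj)) hsub2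
        simpa [hμ, pvMu] using this
      have hμK : μ ≤ K := by
        rw [hμ, hK, pvMu]
        exact List.length_filter_le _ _
      have hW : pvW graph start path = (K + 1) ^ μ := by rw [pvW, ← hK, ← hμ]
      rw [hW]
      calc (neighbors.map ((pvW graph start) ∘ (fun n => path ++ [n]))).sum
          ≤ neighbors.length • (K + 1) ^ (μ - 1) := hsum
        _ = neighbors.length * (K + 1) ^ (μ - 1) := smul_eq_mul _ _
        _ ≤ K * (K + 1) ^ (μ - 1) := Nat.mul_le_mul_right _ (le_trans hlen hμK)
        _ < (K + 1) * (K + 1) ^ (μ - 1) :=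
            Nat.mul_lt_mul_of_lt_of_le (Nat.lt_succ_self K) (le_refl _)
              (Nat.pow_pos (by omega))
        _ = (K + 1) ^ μ := by
            rw [← pow_succ']
            congr 1
            omega
  omega

-- ===== PORT A =====
-- the while loop over the explicit stack; the Lean list's head is the Python list's last
-- element (stack.pop() / append at the tail = pop/push at the head here), so the children
-- pushed in neighbor order are consumed in reversed neighbor order, exactly as in Python.
-- 'none' branches are where Python raises (path[-1] on [] is unreachable; graph[vertex] is
-- a KeyError, sequences[idx][0] an IndexError — Pre_ excludes those inputs).
def dfsLoop (graph : List (Int × List Int)) (start : Int) (sequences : List String)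
    (stack : List (List Int)) (acc : List String) : List String :=
  match stack with
  | [] => acc
  | path :: rest =>
    match _hv : PySem.List.pyGet? path (-1) with
    | none => acc
    | some vertex =>
      match hadj : (PySem.Dict.mk graph).get? vertex with
      | none => acc
      | some adj =>
        dfsLoop graph start sequences
          ((((PySem.Set.ofList adj).filter (fun n => !path.contains n)).map
              (fun n => path ++ [n])).reverse ++ rest)
          (if path.length = sequences.length then
            match pvFirstChars sequences path with
            | none => acc
            | some cs => acc ++ [String.ofList cs]
           else acc)
  termination_by pvSM graph start stack
  decreasing_by
    exact pvSM_dec graph start path rest adj (pv_adj_sub graph start vertex adj hadj)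

def dfs_paths (graph : List (Int × List Int)) (start : Int) (sequences : List String) : List String :=
  dfsLoop graph start sequences [[start]] []

-- ===== PORT B =====
-- rec(path): if the path already has target = len(sequences) vertices, yield the joined word
-- (when exactly at target) and STOP; otherwise recurse on each not-on-path neighbor of
-- path[-1] in reversed order.  'none' branches are Python's raises, as in port A.
def dfsRecB (graph : List (Int × List Int)) (sequences : List String)
    (path : List Int) : List String :=
  if _h : sequences.length ≤ path.length then
    if path.length = sequences.length then
      match pvFirstChars sequences path with
      | none => []
      | some cs => [String.ofList cs]
    else []
  else
    match _hv : PySem.List.pyGet? path (-1) with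
    | none => []
    | some vertex =>
      match (PySem.Dict.mk graph).get? vertex with
      | none => []
      | some adj =>
        (((PySem.Set.ofList adj).filter (fun n => !path.contains n)).reverse).flatMap
          (fun n => dfsRecB graph sequences (path ++ [n]))
  termination_by sequences.length - path.length
  decreasing_by
    simp only [List.length_append, List.length_cons, List.length_nil]
    omega

def dfs_paths_alt (graph : List (Int × List Int)) (start : Int) (sequences : List String) : List String :=
  dfsRecB graph sequences [start]

-- ===== PRECONDITION & SPEC =====
def pvKeyOK (graph : List (Int × List Int)) (v : Int) : Bool :=
  ((PySem.Dict.mk graph).get? v).isSome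
def pvIdxOK (sequences : List String) (v : Int) : Bool :=
  ((PySem.List.pyGet? sequences v).bind (fun s => PySem.Str.pyGet? s 0)).isSome

-- one step of simple-path extension: the successors of p through p's last vertex that are
-- not already on p (a specification-style closure over the input graph, used only by Pre_)
def pvExtend (graph : List (Int × List Int)) (p : List Int) : List (List Int) :=
  match p.getLast? with
  | none => []
  | some v =>
    match (PySem.Dict.mk graph).get? v with
    | none => []
    | some adj =>
      ((PySem.Set.ofList adj).filter (fun n => !p.contains n)).map (fun n => p ++ [n])

-- all simple paths from start with n+1 vertices (only through vertices that are keys)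
def pvLevel (graph : List (Int × List Int)) (start : Int) : Nat → List (List Int)
  | 0 => [[start]]
  | n + 1 => (pvLevel graph start n).flatMap (pvExtend graph)

-- Pre_ holds exactly when the Python A returns: every simple path from start ends in a graph
-- key (else A raises KeyError on its last vertex), and every full-length simple path indexes
-- validly into sequences with nonempty strings (else the emission raises IndexError).
def Pre_dfs_paths (graph : List (Int × List Int)) (start : Int) (sequences : List String) : Prop :=
  (∀ n ∈ List.range (pvUniv graph start).length, ∀ p ∈ pvLevel graph start n,
      (p.getLast?).all (pvKeyOK graph) = true) ∧
  (sequences = [] ∨ ∀ p ∈ pvLevel graph start (sequences.length - 1), ∀ v ∈ p,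
      pvIdxOK sequences v = true)

instance (graph : List (Int × List Int)) (start : Int) (sequences : List String) : Decidable (Pre_dfs_paths graph start sequences) := by unfold Pre_dfs_paths; infer_instance

def pvWitness_dfs_paths : (List (Int × List Int)) × Int × List String :=
  ([(0, [1]), (1, [0])], 0, ["ab", "cd"])

def Spec_dfs_paths (graph : List (Int × List Int)) (start : Int) (sequences : List String) (out : List String) : Prop := out = dfs_paths_alt graph start sequences
instance (graph : List (Int × List Int)) (start : Int) (sequences : List String) (out : List String) : Decidable (Spec_dfs_paths graph start sequences out) := by unfold Spec_dfs_paths; infer_instance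

-- ===== CLAIM (what is proved, stated in full; the proofs are below) =====
def Claim_equal_dfs_paths : Prop := ∀ (graph : List (Int × List Int)) (start : Int) (sequences : List String), Dom_dfs_paths graph start sequences → Pre_dfs_paths graph start sequences → Spec_dfs_paths graph start sequences (dfs_paths graph start sequences)

-- ===== LEMMAS AND PROOFS =====

theorem pvLevel_shape (graph : List (Int × List Int)) (start : Int) :
    ∀ n, ∀ p ∈ pvLevel graph start n,
      p ≠ [] ∧ p.length = n + 1 ∧ p.Nodup ∧ ∀ v ∈ p, v ∈ pvUniv graph start := by
  intro n
  induction n with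
  | zero =>
    intro p hp
    simp only [pvLevel, List.mem_singleton] at hp
    subst hp
    refine ⟨by simp, by simp, by simp, ?_⟩
    intro v hv
    rcases List.mem_singleton.1 hv with rfl
    simp [pvUniv]
  | succ n ih =>
    intro p hp
    rw [pvLevel, List.mem_flatMap] at hp
    obtain ⟨q, hq, hpe⟩ := hp
    obtain ⟨hqne, hqlen, hqnodup, hqsub⟩ := ih q hq
    unfold pvExtend at hpe
    split at hpe
    · cases hpe
    next v hv =>
      split at hpe
      · cases hpe
      next adj hadj =>
        rw [List.mem_map] at hpe
        obtain ⟨m, hm, rfl⟩ := hpe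
        rw [List.mem_filter] at hm
        obtain ⟨hmadj, hmnot⟩ := hm
        have hmnotq : m ∉ q := by simpa using hmnot
        refine ⟨by simp, by simp [hqlen], ?_, ?_⟩
        · rw [List.nodup_append]
          exact ⟨hqnodup, List.nodup_singleton m, by intro a ha b hb he; rw [List.mem_singleton] at hb; subst hb; subst he; exact hmnotq ha⟩
        · intro x hx
          rcases List.mem_append.1 hx with hx | hx
          · exact hqsub x hx
          · rcases List.mem_singleton.1 hx with rfl
            exact pv_adj_sub graph start v adj hadj x
              ((PySem.Set.mem_ofList _ _).1 hmadj)

theorem pvFirstChars_isSome (seqs : List String) :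
    ∀ p : List Int, (∀ v ∈ p, pvIdxOK seqs v = true) → ∃ cs, pvFirstChars seqs p = some cs := by
  intro p
  induction p with
  | nil => intro _; exact ⟨[], rfl⟩
  | cons i is ih =>
    intro h
    have hi : pvIdxOK seqs i = true := h i List.mem_cons_self
    rw [pvIdxOK] at hi
    obtain ⟨c, hc⟩ := Option.isSome_iff_exists.1 hi
    obtain ⟨cs, hcs⟩ := ih (fun v hv => h v (List.mem_cons_of_mem _ hv))
    refine ⟨c :: cs, ?_⟩
    rw [pvFirstChars, hc, hcs]
    rfl

theorem pvRecB_long (graph : List (Int × List Int)) (sequences : List String)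
    (path : List Int) (h : sequences.length < path.length) :
    dfsRecB graph sequences path = [] := by
  rw [dfsRecB, dif_pos (le_of_lt h), if_neg (by omega)]

theorem pv_loop_eq (graph : List (Int × List Int)) (start : Int) (sequences : List String)
    (hkeys : ∀ n ∈ List.range (pvUniv graph start).length, ∀ p ∈ pvLevel graph start n,
        (p.getLast?).all (pvKeyOK graph) = true)
    (hidx : sequences = [] ∨ ∀ p ∈ pvLevel graph start (sequences.length - 1), ∀ v ∈ p,
        pvIdxOK sequences v = true) :
    ∀ (N : Nat) (stack : List (List Int)) (acc : List String),
      pvSM graph start stack ≤ N →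
      (∀ p ∈ stack, ∃ n, p ∈ pvLevel graph start n) →
      dfsLoop graph start sequences stack acc =
        acc ++ stack.flatMap (dfsRecB graph sequences) := by
  intro N
  induction N with
  | zero =>
    intro stack acc hle hinv
    cases stack with
    | nil => simp [dfsLoop]
    | cons p rest =>
      exfalso
      have h1 : 1 ≤ pvW graph start p := Nat.pow_pos (by omega)
      have : pvW graph start p ≤ pvSM graph start (p :: rest) := by
        simp only [pvSM, List.map_cons, List.sum_cons]
        omega
      omega
  | succ N ih =>
    intro stack acc hle hinv
    cases stack with
    | nil => simp [dfsLoop]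
    | cons p rest =>
      obtain ⟨n, hpn⟩ := hinv p List.mem_cons_self
      obtain ⟨hpne, hplen, hpnodup, hpsub⟩ := pvLevel_shape graph start n p hpn
      have hv : PySem.List.pyGet? p (-1) = some (p.getLast hpne) := by
        rw [PySem.List.pyGet?_neg_one, List.getLast?_eq_some_getLast hpne]
      have hnlt : n ∈ List.range (pvUniv graph start).length := by
        rw [List.mem_range]
        have := pv_nodup_subset_length p (pvUniv graph start) hpnodup (fun v hv => hpsub v hv)
        omega
      have hlast := hkeys n hnlt p hpn
      rw [List.getLast?_eq_some_getLast hpne, Option.all_some] at hlast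
      obtain ⟨adj, hadj⟩ := Option.isSome_iff_exists.1 hlast
      rw [dfsLoop]
      split
      next heq => rw [hv] at heq; cases heq
      next vertex heq =>
        rw [hv] at heq
        injection heq with heq
        subst heq
        split
        next heq2 => rw [hadj] at heq2; cases heq2
        next adj2 heq2 =>
          rw [hadj] at heq2
          injection heq2 with heq2
          subst heq2
          have hdec := pvSM_dec graph start p rest adj
            (pv_adj_sub graph start _ adj hadj)
          have hext : pvExtend graph p =
              ((PySem.Set.ofList adj).filter (fun m => !p.contains m)).map (fun m => p ++ [m]) := by
            simp only [pvExtend, List.getLast?_eq_some_getLast hpne, hadj]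
          have hinv' : ∀ c ∈ (((PySem.Set.ofList adj).filter (fun m => !p.contains m)).map
                (fun m => p ++ [m])).reverse ++ rest, ∃ k, c ∈ pvLevel graph start k := by
            intro c hc
            rcases List.mem_append.1 hc with hc | hc
            · refine ⟨n + 1, ?_⟩
              rw [pvLevel, List.mem_flatMap]
              exact ⟨p, hpn, by rw [hext]; exact List.mem_reverse.1 hc⟩
            · exact hinv c (List.mem_cons_of_mem _ hc)
          rw [ih _ _ (by omega) hinv']
          -- split the emission into acc ++ E
          by_cases hlen : p.length = sequences.length
          · -- the popped path is emitted: its word is defined (Pre_'s index condition)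
            have hseqne : sequences ≠ [] := by
              intro hc
              rw [hc] at hlen
              simp at hlen
              exact hpne hlen
            have hall : ∀ v ∈ p, pvIdxOK sequences v = true := by
              rcases hidx with hc | hidx
              · exact absurd hc hseqne
              · have : n = sequences.length - 1 := by omega
                exact hidx p (this ▸ hpn)
            obtain ⟨cs, hcs⟩ := pvFirstChars_isSome sequences p hall
            rw [if_pos hlen, hcs]
            have hrecp : dfsRecB graph sequences p = [String.ofList cs] := by
              rw [dfsRecB, dif_pos (le_of_eq hlen.symm), if_pos hlen, hcs]
            have hchildren : ∀ x ∈ (((PySem.Set.ofList adj).filter (fun m => !p.contains m)).map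
                (fun m => p ++ [m])).reverse, dfsRecB graph sequences x = [] := by
              intro x hx
              rw [List.mem_reverse, List.mem_map] at hx
              obtain ⟨m, _, rfl⟩ := hx
              exact pvRecB_long graph sequences (p ++ [m]) (by simp [hlen])
            rw [List.flatMap_append, List.flatMap_cons, hrecp]
            rw [List.flatMap_eq_nil_iff.2 hchildren]
            simp
          · rw [if_neg hlen]
            rw [List.flatMap_append, List.flatMap_cons]
            have hrecp : dfsRecB graph sequences p =
                (((PySem.Set.ofList adj).filter (fun m => !p.contains m)).reverse).flatMap
                  (fun m => dfsRecB graph sequences (p ++ [m])) := by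
              by_cases hgt : sequences.length ≤ p.length
              · -- p is strictly longer than sequences: both sides are []
                have hplong : sequences.length < p.length := lt_of_le_of_ne hgt (fun hc => hlen hc.symm)
                rw [pvRecB_long graph sequences p hplong]
                symm
                rw [List.flatMap_eq_nil_iff]
                intro x _hx
                exact pvRecB_long graph sequences (p ++ [x]) (by simp; omega)
              · rw [dfsRecB, dif_neg hgt]
                split
                next heq => rw [hv] at heq; cases heq
                next vertex heq =>
                  rw [hv] at heq
                  injection heq with heq
                  subst heq
                  rw [hadj]
            rw [hrecp, ← List.map_reverse, List.flatMap_map]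

-- ===== VERDICT (by name: the statement is the Claim_ definition above) =====
theorem dfs_paths_spec : Claim_equal_dfs_paths := by
  intro graph start sequences _hdom hpre
  unfold Spec_dfs_paths dfs_paths dfs_paths_alt
  rw [pv_loop_eq graph start sequences hpre.1 hpre.2 (pvSM graph start [[start]]) [[start]] []
      (le_refl _) ?_]
  · simp
  · intro p hp
    rcases List.mem_singleton.1 hp with rfl
    exact ⟨0, by simp [pvLevel]⟩
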